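-- pv_equiv track=rewrite | github.com/emilygauvreau/cisc471 | CISC471_A1.py | sharedPairs
-- ===== SOURCE A (Python) =====
-- import itertools
--
-- nucleotides = "ACGT"
--
-- def reverseCompliment(DNAsequence):
--     # Switched the letters to they corresponding pair (A&T, G&C)
--     compliNuc = {
--         "G": "C",
--         "C": "G",
--         "A": "T",
--         "T": "A"
--     }
--     compliment = ""
--     for i in DNAsequence:
--         compliment += compliNuc[i]
--
--     # Use string splicing to reverse the string starting at the back
--     compliment = compliment[::-1]
--
--     return compliment
--
-- def generateAllKmers(numK):
--     kmers = map(''.join, itertools.product(nucleotides, repeat=numK))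
--     return list(sorted(kmers))
--
-- def sharedPairs(k, sequence1, sequence2):
--
--     kmers = generateAllKmers(k)
--     matches = {}
--     for i in kmers:
--         reverse = reverseCompliment(i)
--         if i in sequence1:
--             if i in sequence2:
--                 matches[i] = (sequence1.index(i), sequence2.index(i))
--             elif reverse in sequence2:
--                 matches[i + ', ' + reverse] = (sequence1.index(i), sequence2.index(reverse))
--         if i in sequence2:
--             if reverse in sequence1:
--                 matches[reverse + ', ' + i] = (sequence1.index(reverse), sequence2.index(i))
--
--     return matches
-- ===== SOURCE B (Python) =====
-- def sharedPairs(k, sequence1, sequence2):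
--     comp = {"G": "C", "C": "G", "A": "T", "T": "A"}
--
--     def firstIndices(s):
--         # first index of every length-k window made only of A/C/G/T
--         d = {}
--         for i in range(len(s) - k + 1):
--             w = s[i:i+k]
--             if all(c in comp for c in w) and w not in d:
--                 d[w] = i
--         return d
--
--     idx1 = firstIndices(sequence1)
--     idx2 = firstIndices(sequence2)
--
--     matches = {}
--     for w in sorted(set(idx1) | set(idx2)):
--         rc = ''.join(comp[c] for c in reversed(w))
--         if w in idx1:
--             if w in idx2:
--                 matches[w] = (idx1[w], idx2[w])
--             elif rc in idx2:
--                 matches[w + ', ' + rc] = (idx1[w], idx2[rc])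
--         if w in idx2 and rc in idx1:
--             matches[rc + ', ' + w] = (idx1[rc], idx2[w])
--     return matches
-- ===== Notes on version B (the rewrite author's own statement) =====
-- stated objective: faster
-- what changed: Instead of generating all 4^k candidate k-mers and substring-scanning both sequences for each, B slides a k-window over each sequence once to build a dict of first indices of the ACGT k-mers actually present, then iterates their sorted union; intended as faster (a timing run saw A time out at k=16 where B returned, so no ratio could be measured).
import Mathlib
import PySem

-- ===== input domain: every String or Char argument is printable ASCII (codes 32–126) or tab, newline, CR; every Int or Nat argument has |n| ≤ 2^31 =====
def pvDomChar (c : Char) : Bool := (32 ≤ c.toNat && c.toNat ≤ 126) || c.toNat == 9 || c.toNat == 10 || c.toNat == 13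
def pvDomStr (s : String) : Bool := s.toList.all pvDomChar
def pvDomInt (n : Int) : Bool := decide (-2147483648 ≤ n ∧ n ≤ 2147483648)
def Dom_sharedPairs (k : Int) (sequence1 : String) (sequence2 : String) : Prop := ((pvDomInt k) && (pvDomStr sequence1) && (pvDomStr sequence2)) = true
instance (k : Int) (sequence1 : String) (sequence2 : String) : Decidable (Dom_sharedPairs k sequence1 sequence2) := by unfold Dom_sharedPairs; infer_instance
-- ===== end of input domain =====

-- B replaces A's enumeration of all 4^k candidate k-mers (each tested by substring scans of
-- both sequences) with one sliding-window pass per sequence recording first indices in a dict,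
-- then a single sorted iteration over the k-mers actually present.

-- ===== PORT A =====

-- nucleotides = "ACGT"
def pvNucs : List Char := ['A', 'C', 'G', 'T']

-- A's compliNuc dict as a function on chars; the final branch is unreachable here
-- (reverseCompliment is only applied to strings over ACGT, where Python never raises KeyError)
def pvComp (c : Char) : Char :=
  if c = 'G' then 'C'
  else if c = 'C' then 'G'
  else if c = 'A' then 'T'
  else if c = 'T' then 'A'
  else c

-- reverseCompliment: build the complement by appending char by char, then reverse via [::-1]
def pvRevComp (w : List Char) : List Char :=
  (PySem.List.slice? (w.foldl (fun acc c => acc ++ [pvComp c]) []) none none (-1)).getD []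

-- itertools.product(nucleotides, repeat=n), each tuple joined to a string
def pvProd : Nat → List (List Char)
  | 0 => [[]]
  | n + 1 => pvNucs.flatMap (fun c => (pvProd n).map (fun t => c :: t))

-- Python's sorted() on a list of strings, ported as the library stable merge sort over the
-- same lexicographic order (Python's sorted is a stable O(m log m) sort; on a list without
-- duplicate keys the result is the unique ≤-ordered rearrangement either way)
def pvSorted (xs : List (List Char)) : List (List Char) :=
  xs.mergeSort (fun a b => decide (a ≤ b))

-- generateAllKmers = list(sorted(...))
def pvKmers (n : Nat) : List (List Char) :=
  pvSorted (pvProd n)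

-- one iteration of A's loop body over the current matches dict
def pvStepA (t1 t2 : List Char) (m : PySem.Dict (List Char) (Int × Int)) (i : List Char) :
    PySem.Dict (List Char) (Int × Int) :=
  let rev := pvRevComp i
  let m1 :=
    if PySem.Chars.isIn i t1 then
      if PySem.Chars.isIn i t2 then
        m.insert i (PySem.Chars.find t1 i, PySem.Chars.find t2 i)
      else if PySem.Chars.isIn rev t2 then
        m.insert (i ++ (',' :: ' ' :: rev)) (PySem.Chars.find t1 i, PySem.Chars.find t2 rev)
      else m
    else m
  if PySem.Chars.isIn i t2 then
    if PySem.Chars.isIn rev t1 then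
      m1.insert (rev ++ (',' :: ' ' :: i)) (PySem.Chars.find t1 rev, PySem.Chars.find t2 i)
    else m1
  else m1

-- for k < 0 Python raises ValueError (itertools.product with negative repeat): excluded by Pre_
def sharedPairs (k : Int) (sequence1 : String) (sequence2 : String) : List (String × Int × Int) :=
  if k < 0 then []
  else
    let t1 := sequence1.toList
    let t2 := sequence2.toList
    ((pvKmers k.toNat).foldl (pvStepA t1 t2) PySem.Dict.empty).items.map
      (fun p => (String.ofList p.1, p.2))

-- ===== PORT B =====

-- keys of B's comp dict, in its insertion order ("c in comp" tests)
def pvCompKeys : List Char := ['G', 'C', 'A', 'T']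

-- one iteration of B's window loop: record an all-ACGT window not seen before
def pvStepI (k : Int) (t : List Char) (d : PySem.Dict (List Char) Int) (i : Int) :
    PySem.Dict (List Char) Int :=
  let w := PySem.List.slice t (some i) (some (i + k))
  if w.all (fun c => pvCompKeys.contains c) && !(d.contains w) then d.insert w i else d

-- firstIndices: slide a window over s, record the first index of every all-ACGT window
def pvIdx (k : Int) (t : List Char) : PySem.Dict (List Char) Int :=
  (PySem.List.pyRange 0 ((t.length : Int) - k + 1) 1).foldl (pvStepI k t) PySem.Dict.empty

-- one iteration of B's matches loop
def pvStepB (idx1 idx2 : PySem.Dict (List Char) Int)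
    (m : PySem.Dict (List Char) (Int × Int)) (w : List Char) :
    PySem.Dict (List Char) (Int × Int) :=
  let rc := w.reverse.map pvComp
  let m1 :=
    if idx1.contains w then
      if idx2.contains w then
        m.insert w (idx1.getD w 0, idx2.getD w 0)
      else if idx2.contains rc then
        m.insert (w ++ (',' :: ' ' :: rc)) (idx1.getD w 0, idx2.getD rc 0)
      else m
    else m
  if idx2.contains w then
    if idx1.contains rc then
      m1.insert (rc ++ (',' :: ' ' :: w)) (idx1.getD rc 0, idx2.getD w 0)
    else m1
  else m1

def sharedPairs_alt (k : Int) (sequence1 : String) (sequence2 : String) :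
    List (String × Int × Int) :=
  let t1 := sequence1.toList
  let t2 := sequence2.toList
  let idx1 := pvIdx k t1
  let idx2 := pvIdx k t2
  -- sorted(set(idx1) | set(idx2))
  let cands := pvSorted (PySem.Set.ofList (idx1.keys ++ idx2.keys))
  (cands.foldl (pvStepB idx1 idx2) PySem.Dict.empty).items.map
    (fun p => (String.ofList p.1, p.2))

-- ===== PRECONDITION & SPEC =====
-- A raises ValueError (itertools.product with negative repeat) exactly when k < 0; A returns on every k ≥ 0.
def Pre_sharedPairs (k : Int) (sequence1 : String) (sequence2 : String) : Prop := 0 ≤ k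
instance (k : Int) (sequence1 : String) (sequence2 : String) :
    Decidable (Pre_sharedPairs k sequence1 sequence2) := by unfold Pre_sharedPairs; infer_instance

def pvWitness_sharedPairs : Int × String × String := (2, "TAACG", "GACGTT")

def Spec_sharedPairs (k : Int) (sequence1 : String) (sequence2 : String)
    (out : List (String × Int × Int)) : Prop := out = sharedPairs_alt k sequence1 sequence2
instance (k : Int) (sequence1 : String) (sequence2 : String) (out : List (String × Int × Int)) :
    Decidable (Spec_sharedPairs k sequence1 sequence2 out) := by
  unfold Spec_sharedPairs; infer_instance

-- ===== CLAIM (what is proved, stated in full; the proofs are below) =====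
def Claim_equal_sharedPairs : Prop := ∀ (k : Int) (sequence1 : String) (sequence2 : String), Dom_sharedPairs k sequence1 sequence2 → Pre_sharedPairs k sequence1 sequence2 → Spec_sharedPairs k sequence1 sequence2 (sharedPairs k sequence1 sequence2)

-- ===== LEMMAS AND PROOFS =====

theorem pvWitness_ok : Dom_sharedPairs pvWitness_sharedPairs.1 pvWitness_sharedPairs.2.1
    pvWitness_sharedPairs.2.2 ∧ Pre_sharedPairs pvWitness_sharedPairs.1 pvWitness_sharedPairs.2.1
    pvWitness_sharedPairs.2.2 := by
  constructor <;> decide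

-- a k-mer/window is "good" when it has length k and uses only A/C/G/T
abbrev pvGood (n : Nat) (w : List Char) : Prop := w.length = n ∧ ∀ c ∈ w, c ∈ pvNucs

-- B's reverse complement equals A's reverseCompliment
theorem pvRevComp_eq (w : List Char) : pvRevComp w = w.reverse.map pvComp := by
  rw [pvRevComp, PySem.List.slice?_none_none_neg_one, Option.getD_some,
    PySem.List.foldl_append_singleton_eq_map, List.nil_append, List.map_reverse]

theorem pvComp_mem_nucs {c : Char} (h : c ∈ pvNucs) : pvComp c ∈ pvNucs := by
  fin_cases h <;> decide

theorem pvGood_rev {n : Nat} {w : List Char} (h : pvGood n w) :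
    pvGood n (w.reverse.map pvComp) := by
  obtain ⟨hl, hm⟩ := h
  refine ⟨by simp [hl], ?_⟩
  intro c hc
  simp only [List.mem_map, List.mem_reverse] at hc
  obtain ⟨a, ha, rfl⟩ := hc
  exact pvComp_mem_nucs (hm a ha)

-- B's membership test in comp's keys = membership in nucleotides
theorem contains_compKeys (c : Char) : pvCompKeys.contains c = decide (c ∈ pvNucs) := by
  simp only [pvCompKeys, pvNucs, List.contains_eq_mem]
  by_cases h1 : c = 'G' <;> by_cases h2 : c = 'C' <;> by_cases h3 : c = 'A' <;>
    by_cases h4 : c = 'T' <;> simp [h1, h2, h3, h4]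

theorem all_compKeys (w : List Char) :
    (w.all (fun c => pvCompKeys.contains c) = true) ↔ ∀ c ∈ w, c ∈ pvNucs := by
  simp only [List.all_eq_true, contains_compKeys, decide_eq_true_eq]

-- membership in the product list
theorem mem_pvProd (n : Nat) (w : List Char) : w ∈ pvProd n ↔ pvGood n w := by
  induction n generalizing w with
  | zero =>
    simp only [pvProd, List.mem_singleton, pvGood]
    constructor
    · rintro rfl; simp
    · rintro ⟨hl, -⟩; exact List.eq_nil_of_length_eq_zero hl
  | succ n ih =>
    simp only [pvProd, List.mem_flatMap, List.mem_map, pvGood]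
    constructor
    · rintro ⟨c, hc, t, ht, rfl⟩
      obtain ⟨hl, hm⟩ := (ih t).mp ht
      refine ⟨by simp [hl], ?_⟩
      intro x hx
      rcases List.mem_cons.mp hx with rfl | hx
      · exact hc
      · exact hm x hx
    · rintro ⟨hl, hm⟩
      cases w with
      | nil => simp at hl
      | cons c t =>
        refine ⟨c, hm c (by simp), t, (ih t).mpr ⟨by simpa using hl, ?_⟩, rfl⟩
        intro x hx; exact hm x (List.mem_cons_of_mem _ hx)

theorem nodup_pvProd (n : Nat) : (pvProd n).Nodup := by
  induction n with
  | zero => simp [pvProd]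
  | succ n ih =>
    rw [pvProd, List.nodup_flatMap]
    constructor
    · intro c _
      exact ih.map (fun a b h => by injection h)
    · have hnd : pvNucs.Nodup := by decide
      refine List.Pairwise.imp ?_ hnd
      intro a b hab x hx1 hx2
      simp only [List.mem_map] at hx1 hx2
      obtain ⟨u, -, rfl⟩ := hx1
      obtain ⟨v, -, hv⟩ := hx2
      exact hab (by injection hv.symm)

-- pvSorted really sorts: the two side conditions of pairwise_mergeSort
theorem pvSorted_pairwise_le (xs : List (List Char)) :
    (pvSorted xs).Pairwise (fun a b : List Char => a ≤ b) := by
  unfold pvSorted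
  refine (List.pairwise_mergeSort ?_ ?_ xs).imp (fun h => of_decide_eq_true h)
  · exact fun a b c hab hbc =>
      decide_eq_true (le_trans (of_decide_eq_true hab) (of_decide_eq_true hbc))
  · intro a b
    rcases le_total a b with h | h <;> simp [decide_eq_true h]

theorem pvSorted_pairwise_lt {xs : List (List Char)} (h : xs.Nodup) :
    (pvSorted xs).Pairwise (fun a b : List Char => a < b) := by
  have hnd : (pvSorted xs).Pairwise (fun a b : List Char => a ≠ b) :=
    ((List.mergeSort_perm xs _).symm).nodup h
  exact ((pvSorted_pairwise_le xs).and hnd).imp (fun h => lt_of_le_of_ne h.1 h.2)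

-- the sorted k-mer list is strictly increasing
theorem pairwise_lt_pvKmers (n : Nat) : (pvKmers n).Pairwise (fun a b => a < b) :=
  pvSorted_pairwise_lt (nodup_pvProd n)

theorem nodup_pvKmers (n : Nat) : (pvKmers n).Nodup := by
  unfold pvKmers pvSorted
  exact ((List.mergeSort_perm (pvProd n) _).symm).nodup (nodup_pvProd n)

-- the window slice at a natural position
theorem window_eq (k : Int) (hk : 0 ≤ k) (t : List Char) (i : Nat) :
    PySem.List.slice t (some (i : Int)) (some ((i : Int) + k)) = (t.drop i).take k.toNat := by
  have h : (i : Int) + k = (i : Int) + (k.toNat : Int) := by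
    rw [Int.toNat_of_nonneg hk]
  rw [h, PySem.List.slice_natCast_add]

-- invariant of B's window loop: after the first N windows, the dict maps exactly the good
-- words occurring among them to Python's find value
theorem pvIdxAux_get (k : Int) (hk : 0 ≤ k) (t : List Char) (N : Nat)
    (hN : (N : Int) ≤ (t.length : Int) - k + 1) :
    ∀ w : List Char,
      ((List.range N).foldl
          (fun (d : PySem.Dict (List Char) Int) (i : Nat) => pvStepI k t d (i : Int))
          PySem.Dict.empty).get? w =
        if pvGood k.toNat w ∧ ∃ i < N, w <+: t.drop i then some (PySem.Chars.find t w)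
        else none := by
  induction N with
  | zero => intro w; simp [PySem.Dict.get?_empty]
  | succ N ih =>
    have hN' : (N : Int) ≤ (t.length : Int) - k + 1 := by push_cast at hN ⊢; omega
    have hNk : N + k.toNat ≤ t.length := by
      have hkk : (k.toNat : Int) = k := Int.toNat_of_nonneg hk
      push_cast at hN; omega
    intro w
    rw [List.range_succ, List.foldl_append, List.foldl_cons, List.foldl_nil]
    set d := (List.range N).foldl
      (fun (d : PySem.Dict (List Char) Int) (i : Nat) => pvStepI k t d (i : Int))
      PySem.Dict.empty with hd
    have IH := ih hN'
    have hwin := window_eq k hk t N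
    set wN := (t.drop N).take k.toNat with hwN
    have hlenwN : wN.length = k.toNat := by
      rw [hwN, List.length_take, List.length_drop]; omega
    have hprefN : wN <+: t.drop N := List.take_prefix _ _
    have huniq : ∀ v : List Char, v.length = k.toNat → (v <+: t.drop N ↔ v = wN) := by
      intro v hv
      constructor
      · intro h; rw [List.prefix_iff_eq_take] at h; rw [h, hv, hwN]
      · rintro rfl; exact hprefN
    simp only [pvStepI, hwin]
    by_cases hall : wN.all (fun c => pvCompKeys.contains c) = true
    · by_cases hcont : d.contains wN = true
      · -- window present already: no change, and the new witness adds nothing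
        rw [if_neg (by rw [hcont]; simp), IH]
        have hsome : (d.get? wN).isSome := by
          rw [← PySem.Dict.contains_eq_isSome_get?, hcont]
        rw [IH wN] at hsome
        have hcond : pvGood k.toNat wN ∧ ∃ i < N, wN <+: t.drop i := by
          by_contra hc
          rw [if_neg hc] at hsome
          simp at hsome
        congr 1
        apply propext
        constructor
        · rintro ⟨hg, i, hi, hp⟩
          exact ⟨hg, i, Nat.lt_succ_of_lt hi, hp⟩
        · rintro ⟨hg, i, hi, hp⟩
          refine ⟨hg, ?_⟩
          rcases Nat.lt_succ_iff_lt_or_eq.mp hi with hi' | rfl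
          · exact ⟨i, hi', hp⟩
          · have hwn : w = wN := (huniq w hg.1).mp hp
            rw [hwn]
            exact hcond.2
      · -- new window inserted at index N
        rw [if_pos (by rw [Bool.and_eq_true]; exact ⟨hall, by simp [hcont]⟩)]
        have hgoodN : pvGood k.toNat wN := ⟨hlenwN, (all_compKeys wN).mp hall⟩
        rw [PySem.Dict.get?_insert]
        by_cases hw : w = wN
        · rw [if_pos hw, hw, if_pos ⟨hgoodN, N, Nat.lt_succ_self N, hprefN⟩]
          -- Python's find value at the first occurrence is exactly N
          have hisIn : PySem.Chars.isIn wN t = true :=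
            (PySem.Chars.exists_prefix_drop_iff_isIn wN t).mp ⟨N, hprefN⟩
          have h0 : 0 ≤ PySem.Chars.find t wN :=
            (PySem.Chars.find_nonneg_iff t wN).mpr ((PySem.Chars.isIn_iff_infix wN t).mp hisIn)
          obtain ⟨hfpre, hfmin⟩ := PySem.Chars.find_spec h0
          have hle : (PySem.Chars.find t wN).toNat ≤ N := by
            by_contra hlt
            exact hfmin N (by omega) hprefN
          have hge : ¬ (PySem.Chars.find t wN).toNat < N := by
            intro hlt
            have hsome : (d.get? wN).isSome := by
              rw [IH wN, if_pos ⟨hgoodN, (PySem.Chars.find t wN).toNat, hlt, hfpre⟩]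
              rfl
            rw [← PySem.Dict.contains_eq_isSome_get?] at hsome
            exact hcont hsome
          have hfind : PySem.Chars.find t wN = (N : Int) := by omega
          rw [hfind]
        · rw [if_neg hw, IH]
          congr 1
          apply propext
          constructor
          · rintro ⟨hg, i, hi, hp⟩
            exact ⟨hg, i, Nat.lt_succ_of_lt hi, hp⟩
          · rintro ⟨hg, i, hi, hp⟩
            refine ⟨hg, ?_⟩
            rcases Nat.lt_succ_iff_lt_or_eq.mp hi with hi' | rfl
            · exact ⟨i, hi', hp⟩
            · exact absurd ((huniq w hg.1).mp hp) hw
    · -- window has a non-ACGT char: skipped, and no good word occurs at N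
      have hallf : wN.all (fun c => pvCompKeys.contains c) = false := by
        simpa using hall
      rw [if_neg (by rw [hallf]; simp), IH]
      congr 1
      apply propext
      constructor
      · rintro ⟨hg, i, hi, hp⟩
        exact ⟨hg, i, Nat.lt_succ_of_lt hi, hp⟩
      · rintro ⟨hg, i, hi, hp⟩
        refine ⟨hg, ?_⟩
        rcases Nat.lt_succ_iff_lt_or_eq.mp hi with hi' | rfl
        · exact ⟨i, hi', hp⟩
        · have hwn : w = wN := (huniq w hg.1).mp hp
          exact absurd ((all_compKeys wN).mpr (hwn ▸ hg.2)) hall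

-- characterization of firstIndices: lookup succeeds exactly on the good substrings,
-- returning Python's str.find first-occurrence index
theorem pvIdx_get (k : Int) (hk : 0 ≤ k) (t : List Char) (w : List Char) :
    (pvIdx k t).get? w =
      if pvGood k.toNat w ∧ PySem.Chars.isIn w t then some (PySem.Chars.find t w)
      else none := by
  have hkk : (k.toNat : Int) = k := Int.toNat_of_nonneg hk
  rw [pvIdx]
  by_cases hM : 0 ≤ (t.length : Int) - k + 1
  · set M := (t.length : Int) - k + 1 with hMdef
    have hMcast : M = (M.toNat : Int) := (Int.toNat_of_nonneg hM).symm
    rw [hMcast, PySem.List.pyRange_zero_natCast, List.foldl_map,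
      pvIdxAux_get k hk t M.toNat (by omega) w]
    congr 1
    apply propext
    apply and_congr_right
    intro hg
    constructor
    · rintro ⟨i, hi, hp⟩
      exact (PySem.Chars.exists_prefix_drop_iff_isIn w t).mp ⟨i, hp⟩
    · intro hisIn
      obtain ⟨j, hp⟩ := (PySem.Chars.exists_prefix_drop_iff_isIn w t).mpr hisIn
      have hwl := hg.1
      by_cases hj : j + k.toNat ≤ t.length
      · exact ⟨j, by omega, hp⟩
      · -- the drop is empty there, so k = 0 and the empty word occurs at 0 as well
        have hlen0 : w.length ≤ t.length - j := by simpa using hp.length_le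
        have hk0 : k.toNat = 0 := by omega
        have hw0 : w = [] := List.eq_nil_of_length_eq_zero (by omega)
        exact ⟨0, by omega, by rw [hw0]; exact List.nil_prefix⟩
  · rw [PySem.List.pyRange_one_eq_nil (by omega), List.foldl_nil]
    rw [if_neg ?_, PySem.Dict.get?_empty]
    rintro ⟨hg, hisIn⟩
    have hinf := (PySem.Chars.isIn_iff_infix w t).mp hisIn
    have := hinf.length_le
    have hwl := hg.1
    omega

theorem pvIdx_contains (k : Int) (hk : 0 ≤ k) (t w : List Char) :
    (pvIdx k t).contains w = decide (pvGood k.toNat w ∧ PySem.Chars.isIn w t) := by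
  rw [PySem.Dict.contains_eq_isSome_get?, pvIdx_get k hk t w]
  by_cases h : pvGood k.toNat w ∧ PySem.Chars.isIn w t
  · rw [if_pos h, decide_eq_true h]; rfl
  · rw [if_neg h, decide_eq_false h]; rfl

-- dropping the k-mers absent from both sequences does not change A's fold
theorem foldl_eq_foldl_filter {α β : Type} (L : List α) (f : β → α → β) (p : α → Bool)
    (h : ∀ d, ∀ w ∈ L, p w = false → f d w = d) (d : β) :
    L.foldl f d = (L.filter p).foldl f d := by
  induction L generalizing d with
  | nil => rfl
  | cons x xs ih =>
    by_cases hx : p x = true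
    · simp only [List.foldl_cons, List.filter_cons, hx, if_pos]
      exact ih (fun d w hw => h d w (List.mem_cons_of_mem _ hw)) (f d x)
    · have hx' : p x = false := by simpa using hx
      simp only [List.foldl_cons, List.filter_cons, hx', Bool.false_eq_true, if_false,
        h d x (List.mem_cons_self) hx']
      exact ih (fun d w hw => h d w (List.mem_cons_of_mem _ hw)) d

-- the filtered k-mer list IS B's sorted candidate list
theorem filter_kmers_eq_cands (k : Int) (hk : 0 ≤ k) (t1 t2 : List Char) :
    (pvKmers k.toNat).filter
        (fun w => (pvIdx k t1).contains w || (pvIdx k t2).contains w) =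
      pvSorted (PySem.Set.ofList ((pvIdx k t1).keys ++ (pvIdx k t2).keys)) := by
  set p : List Char → Bool := fun w => (pvIdx k t1).contains w || (pvIdx k t2).contains w
  set S := PySem.Set.ofList ((pvIdx k t1).keys ++ (pvIdx k t2).keys) with hS
  have hpw1 : ((pvKmers k.toNat).filter p).Pairwise (fun a b : List Char => a < b) :=
    (pairwise_lt_pvKmers k.toNat).filter p
  have hndS : S.Nodup :=
    PySem.Set.nodup_ofList ((pvIdx k t1).keys ++ (pvIdx k t2).keys)
  have hpw2 : (pvSorted S).Pairwise (fun a b : List Char => a < b) :=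
    pvSorted_pairwise_lt hndS
  have hnd1 : ((pvKmers k.toNat).filter p).Nodup := (nodup_pvKmers k.toNat).filter p
  have hnd2 : (pvSorted S).Nodup := ((List.mergeSort_perm S _).symm).nodup hndS
  have hmem : ∀ w : List Char, w ∈ (pvKmers k.toNat).filter p ↔ w ∈ pvSorted S := by
    intro w
    rw [List.mem_filter]
    unfold pvSorted
    rw [List.mem_mergeSort, hS, PySem.Set.mem_ofList, List.mem_append,
      ← PySem.Dict.contains_iff_mem_keys, ← PySem.Dict.contains_iff_mem_keys]
    unfold pvKmers pvSorted
    rw [List.mem_mergeSort, mem_pvProd]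
    simp only [p, Bool.or_eq_true, pvIdx_contains k hk, decide_eq_true_eq]
    constructor
    · rintro ⟨hg, h | h⟩
      · exact Or.inl ⟨hg, h.2⟩
      · exact Or.inr ⟨hg, h.2⟩
    · rintro (⟨hg, h⟩ | ⟨hg, h⟩)
      · exact ⟨hg, Or.inl ⟨hg, h⟩⟩
      · exact ⟨hg, Or.inr ⟨hg, h⟩⟩
  have hperm := (List.perm_ext_iff_of_nodup hnd1 hnd2).mpr hmem
  exact List.eq_of_perm_of_sorted
    (fun a b _ _ h1 h2 => absurd h1 (lt_asymm h2)) hpw1 hpw2 hperm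

-- getD on firstIndices, unconditionally
theorem pvIdx_getD_eq (k : Int) (hk : 0 ≤ k) (t w : List Char) :
    (pvIdx k t).getD w 0 =
      if pvGood k.toNat w ∧ PySem.Chars.isIn w t then PySem.Chars.find t w else 0 := by
  rw [PySem.Dict.getD_eq_get?_getD, pvIdx_get k hk t w]
  by_cases h : pvGood k.toNat w ∧ PySem.Chars.isIn w t
  · rw [if_pos h, if_pos h, Option.getD_some]
  · rw [if_neg h, if_neg h, Option.getD_none]

-- contains on firstIndices collapses to Python's substring test on good words
theorem contains_of_good (k : Int) (hk : 0 ≤ k) (t w : List Char)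
    (hg : pvGood k.toNat w) :
    (pvIdx k t).contains w = PySem.Chars.isIn w t := by
  rw [pvIdx_contains k hk]
  by_cases h : PySem.Chars.isIn w t = true
  · rw [h]; exact decide_eq_true ⟨hg, rfl⟩
  · have hf : PySem.Chars.isIn w t = false := by simpa using h
    rw [hf]; exact decide_eq_false (fun hc => Bool.false_ne_true hc.2)

-- per-element agreement of the two loop bodies on good k-mers
theorem step_eq (k : Int) (hk : 0 ≤ k) (t1 t2 : List Char) (w : List Char)
    (hg : pvGood k.toNat w) (m : PySem.Dict (List Char) (Int × Int)) :
    pvStepA t1 t2 m w = pvStepB (pvIdx k t1) (pvIdx k t2) m w := by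
  have hgr : pvGood k.toNat (w.reverse.map pvComp) := pvGood_rev hg
  simp only [pvStepA, pvStepB, pvRevComp_eq,
    contains_of_good k hk t1 w hg, contains_of_good k hk t2 w hg,
    contains_of_good k hk t1 (w.reverse.map pvComp) hgr,
    contains_of_good k hk t2 (w.reverse.map pvComp) hgr,
    pvIdx_getD_eq k hk t1, pvIdx_getD_eq k hk t2]
  split_ifs <;> first
    | rfl
    | tauto

-- ===== VERDICT (by name: the statement is the Claim_ definition above) =====
theorem sharedPairs_spec : Claim_equal_sharedPairs := by
  intro k s1 s2 _hdom hk
  unfold Spec_sharedPairs sharedPairs sharedPairs_alt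
  have hk' : ¬ k < 0 := not_lt.mpr hk
  rw [if_neg hk']
  dsimp only
  congr 1
  congr 1
  rw [foldl_eq_foldl_filter (pvKmers k.toNat) _
      (fun w => (pvIdx k s1.toList).contains w || (pvIdx k s2.toList).contains w) ?_,
    filter_kmers_eq_cands k hk]
  · apply PySem.List.foldl_congr_mem
    intro acc w hw
    have hg : pvGood k.toNat w := by
      have hmem := List.mem_mergeSort.mp hw
      rw [PySem.Set.mem_ofList, List.mem_append] at hmem
      rcases hmem with h | h
      all_goals {
        have hc := (PySem.Dict.contains_iff_mem_keys _ _).mpr h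
        rw [pvIdx_contains k hk] at hc
        exact (of_decide_eq_true hc).1 }
    exact step_eq k hk s1.toList s2.toList w hg acc
  · intro d w hw hp
    have hg : pvGood k.toNat w := (mem_pvProd _ _).mp (List.mem_mergeSort.mp hw)
    simp only [Bool.or_eq_false_iff, pvIdx_contains k hk, decide_eq_false_iff_not] at hp
    have h1 : PySem.Chars.isIn w s1.toList = false := by
      by_contra h
      exact hp.1 ⟨hg, by simpa using h⟩
    have h2 : PySem.Chars.isIn w s2.toList = false := by
      by_contra h
      exact hp.2 ⟨hg, by simpa using h⟩
    simp [pvStepA, h1, h2]
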